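-- pv_equiv track=rewrite | github.com/jintaos2/Anime-Crawler | live_update/download.py | epsode_str2int
-- ===== SOURCE A (Python) =====
-- def epsode_str2int(a:str) -> set: # '1-2, 5-6, 9+' -> ...11111111001100110
--     ret = 0
--     a = a.split(',')
--     for i in a:
--         if not i:
--             continue
--         if i[-1] == '+':        # '7+'
--             ret |= ~((1 << int(i[:-1])) - 1)
--             continue
--         ii = i.split('-')
--         if len(ii) == 1:
--             ret |= 1 << int(i)
--         elif len(ii) == 2:
--             ii = [int(ii[0]), int(ii[1])+1]
--             ret |= ((1 << ii[1]) - 1) & ~((1 << ii[0]) - 1)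
--     return ret
-- ===== SOURCE B (Python) =====
-- def epsode_str2int(a: str) -> set:
--     # Two staged passes: first parse into finite intervals + the minimal open tail,
--     # then render the bitmask (per-bit loop for intervals, one negative mask for the tail).
--     intervals = []
--     tail = None
--     for seg in a.split(','):
--         if not seg:
--             continue
--         if seg[-1] == '+':
--             n = int(seg[:-1])
--             tail = n if tail is None else min(tail, n)
--             continue
--         nums = seg.split('-')
--         if len(nums) == 1:
--             intervals.append((int(seg), int(seg)))
--         elif len(nums) == 2:
--             intervals.append((int(nums[0]), int(nums[1])))
--     ret = 0
--     for lo, hi in intervals: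
--         for e in range(lo, hi + 1):
--             ret |= 1 << e
--     if tail is not None:
--         ret |= -(1 << tail)
--     return ret
-- ===== Notes on version B (the rewrite author's own statement) =====
-- stated objective: alternative
-- what changed: B is restructured into two staged passes: first parse the segments into a list of finite intervals plus the minimal open-tail start, then render the bitmask by setting each interval's bits one at a time and OR-ing a single negative tail mask, instead of A's single pass that ORs closed-form range masks ((1<<b)-1)&~((1<<a)-1) as it scans.
import Mathlib
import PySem

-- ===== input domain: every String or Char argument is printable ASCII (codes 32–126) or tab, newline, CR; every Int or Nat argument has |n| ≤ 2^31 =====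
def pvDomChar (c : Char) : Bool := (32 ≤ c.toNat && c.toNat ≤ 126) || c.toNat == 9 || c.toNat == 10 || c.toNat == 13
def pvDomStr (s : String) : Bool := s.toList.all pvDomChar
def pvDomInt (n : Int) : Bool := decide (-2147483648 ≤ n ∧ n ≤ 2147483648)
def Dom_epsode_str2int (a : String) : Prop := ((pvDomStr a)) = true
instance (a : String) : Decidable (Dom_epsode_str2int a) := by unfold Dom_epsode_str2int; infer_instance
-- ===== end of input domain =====

-- B replaces A's single-pass closed-form mask arithmetic by two staged passes: parse into
-- finite intervals plus the minimal open tail, then render the mask bit by bit (alternative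
-- decomposition, same cost).

-- Python's  1 << n  (n : Nat); used by both ports
def pvShl1 (n : Nat) : Int := (1 : Int) <<< n

-- ===== PORT A =====
-- loop body of A's single for-loop (Option.getD 0 stands where Python would raise ValueError; Pre_ excludes those inputs)
def epsode_str2int_step (ret : Int) (i : String) : Int :=
  if i = "" then ret
  else if PySem.Str.pyGet? i (-1) = some '+' then
    PySem.Int.bor ret (Int.not ((pvShl1 ((PySem.Int.ofStr? (PySem.Str.slice i none (some (-1)))).getD 0).toNat) - 1))
  else if ((PySem.Str.split? i "-").getD []).length = 1 then
    PySem.Int.bor ret (pvShl1 ((PySem.Int.ofStr? i).getD 0).toNat)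
  else if ((PySem.Str.split? i "-").getD []).length = 2 then
    PySem.Int.bor ret (PySem.Int.band
      ((pvShl1 (((PySem.Int.ofStr? (((PySem.Str.split? i "-").getD []).getD 1 "")).getD 0 + 1)).toNat) - 1)
      (Int.not ((pvShl1 ((PySem.Int.ofStr? (((PySem.Str.split? i "-").getD []).getD 0 "")).getD 0).toNat) - 1)))
  else ret

def epsode_str2int (a : String) : Int :=
  ((PySem.Str.split? a ",").getD []).foldl epsode_str2int_step 0

-- ===== PORT B =====
-- pass 1: collect the finite intervals in order and the minimal open-tail start
def pvParseStep (st : List (Int × Int) × Option Int) (seg : String) : List (Int × Int) × Option Int :=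
  if seg = "" then st
  else if PySem.Str.pyGet? seg (-1) = some '+' then
    (st.1,
      match st.2 with
      | none => some ((PySem.Int.ofStr? (PySem.Str.slice seg none (some (-1)))).getD 0)
      | some t => some (min t ((PySem.Int.ofStr? (PySem.Str.slice seg none (some (-1)))).getD 0)))
  else
    if ((PySem.Str.split? seg "-").getD []).length = 1 then
      (st.1 ++ [((PySem.Int.ofStr? seg).getD 0, (PySem.Int.ofStr? seg).getD 0)], st.2)
    else if ((PySem.Str.split? seg "-").getD []).length = 2 then
      (st.1 ++ [((PySem.Int.ofStr? (((PySem.Str.split? seg "-").getD []).getD 0 "")).getD 0,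
                 (PySem.Int.ofStr? (((PySem.Str.split? seg "-").getD []).getD 1 "")).getD 0)], st.2)
    else st

-- pass 2a: for e in range(lo, hi+1): ret |= 1 << e
def pvSetBits (ret : Int) (iv : Int × Int) : Int :=
  (PySem.List.pyRange iv.1 (iv.2 + 1)).foldl (fun r e => PySem.Int.bor r (pvShl1 e.toNat)) ret

-- pass 2b: render the intervals, then the tail mask if present
def pvFinish (st : List (Int × Int) × Option Int) : Int :=
  match st.2 with
  | none => st.1.foldl pvSetBits 0
  | some t => PySem.Int.bor (st.1.foldl pvSetBits 0) (-(pvShl1 t.toNat))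

def epsode_str2int_alt (a : String) : Int :=
  pvFinish (((PySem.Str.split? a ",").getD []).foldl pvParseStep ([], none))

-- ===== PRECONDITION & SPEC =====
-- a comma-split segment is admissible iff Python's int() calls on it succeed and the
-- resulting shift amounts are nonnegative (otherwise A raises ValueError)
def pvSegOK (i : String) : Bool :=
  if i = "" then true
  else if PySem.Str.pyGet? i (-1) = some '+' then
    match PySem.Int.ofStr? (PySem.Str.slice i none (some (-1))) with
    | some n => decide (0 ≤ n)
    | none => false
  else if ((PySem.Str.split? i "-").getD []).length = 1 then
    match PySem.Int.ofStr? i with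
    | some n => decide (0 ≤ n)
    | none => false
  else if ((PySem.Str.split? i "-").getD []).length = 2 then
    match PySem.Int.ofStr? (((PySem.Str.split? i "-").getD []).getD 0 ""),
          PySem.Int.ofStr? (((PySem.Str.split? i "-").getD []).getD 1 "") with
    | some lo, some hi => decide (0 ≤ lo ∧ 0 ≤ hi)
    | _, _ => false
  else true

-- Pre_ holds exactly when every segment parses (A raises ValueError otherwise)
def Pre_epsode_str2int (a : String) : Prop :=
  ∀ i ∈ (PySem.Str.split? a ",").getD [], pvSegOK i = true

instance (a : String) : Decidable (Pre_epsode_str2int a) := by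
  unfold Pre_epsode_str2int; infer_instance

def pvWitness_epsode_str2int : String := "1-2, 5-6, 9+"

def Spec_epsode_str2int (a : String) (out : Int) : Prop := out = epsode_str2int_alt a
instance (a : String) (out : Int) : Decidable (Spec_epsode_str2int a out) := by
  unfold Spec_epsode_str2int; infer_instance

-- ===== CLAIM (what is proved, stated in full; the proofs are below) =====
def Claim_equal_epsode_str2int : Prop :=
  ∀ (a : String), Dom_epsode_str2int a → Pre_epsode_str2int a →
    Spec_epsode_str2int a (epsode_str2int a)

-- ===== LEMMAS AND PROOFS =====

theorem pv_not_eq (x : Int) : Int.not x = -x - 1 := by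
  cases x with
  | ofNat n => simp [Int.not, Int.negSucc_eq]; omega
  | negSucc n => simp [Int.not, Int.negSucc_eq]

theorem pv_shl_one (n : Nat) : pvShl1 n = ((2 ^ n : Nat) : Int) := by
  unfold pvShl1
  rw [Int.shiftLeft_eq]
  push_cast
  ring

-- x - (x & y) drops from x exactly the bits shared with y
theorem pv_sub_and (x y : Nat) : x - (x &&& y) = Nat.ldiff x y := by
  induction x using Nat.binaryRec generalizing y with
  | zero =>
    refine (Nat.eq_of_testBit_eq fun k => ?_).symm
    simp [Nat.testBit_ldiff]
  | bit a m ih =>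
    rw [← Nat.bit_testBit_zero_shiftRight_one y, Nat.land_bit, Nat.ldiff_bit]
    have hle : m &&& (y >>> 1) ≤ m := Nat.and_le_left
    have := ih (y >>> 1)
    cases a <;> cases hy : y.testBit 0 <;>
      simp [Nat.bit] <;> omega

-- PySem's Python-exact OR coincides with Mathlib's Int.lor
theorem pv_bor_lor (a b : Int) : PySem.Int.bor a b = Int.lor a b := by
  rcases a with m | m <;> rcases b with n | n <;>
    simp [PySem.Int.bor, Int.lor, Int.negSucc_eq, pv_sub_and] <;>
    omega

theorem pv_int_ext {a b : Int} (h : ∀ k, a.testBit k = b.testBit k) : a = b := by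
  rcases a with m | m <;> rcases b with n | n
  · exact congrArg Int.ofNat (Nat.eq_of_testBit_eq (by simpa [Int.testBit] using h))
  · exfalso
    have hk := h (max m n)
    have hm : m.testBit (max m n) = false :=
      Nat.testBit_eq_false_of_lt (lt_of_le_of_lt (Nat.le_max_left m n) Nat.lt_two_pow_self)
    have hn : n.testBit (max m n) = false :=
      Nat.testBit_eq_false_of_lt (lt_of_le_of_lt (Nat.le_max_right m n) Nat.lt_two_pow_self)
    simp [Int.testBit, hm, hn] at hk
  · exfalso
    have hk := h (max m n)
    have hm : m.testBit (max m n) = false :=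
      Nat.testBit_eq_false_of_lt (lt_of_le_of_lt (Nat.le_max_left m n) Nat.lt_two_pow_self)
    have hn : n.testBit (max m n) = false :=
      Nat.testBit_eq_false_of_lt (lt_of_le_of_lt (Nat.le_max_right m n) Nat.lt_two_pow_self)
    simp [Int.testBit, hm, hn] at hk
  · have : m = n := Nat.eq_of_testBit_eq (by
      intro k
      have := h k
      simpa [Int.testBit] using this)
    rw [this]

theorem pv_bor_assoc (a b c : Int) :
    PySem.Int.bor (PySem.Int.bor a b) c = PySem.Int.bor a (PySem.Int.bor b c) := by
  simp only [pv_bor_lor]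
  apply pv_int_ext
  intro k
  simp [Int.testBit_lor, Bool.or_assoc]

-- rotate the last two OR operands
theorem pv_bor_rot (f m t : Int) :
    PySem.Int.bor (PySem.Int.bor f m) t = PySem.Int.bor (PySem.Int.bor f t) m := by
  rw [pv_bor_assoc, pv_bor_assoc, PySem.Int.bor_comm m t]

theorem pv_and_masks (a b : Nat) : (2 ^ b - 1) &&& (2 ^ a - 1) = 2 ^ min a b - 1 := by
  apply Nat.eq_of_testBit_eq; intro i
  simp [Nat.testBit_two_pow_sub_one]

theorem pv_or_top (x k : Nat) (h : x < 2 ^ k) : x ||| 2 ^ k = x + 2 ^ k := by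
  have h2 := Nat.two_pow_add_eq_or_of_lt (i := k) h 1
  rw [Nat.mul_one] at h2
  rw [Nat.lor_comm]
  omega

-- band of a nonnegative with a negative argument, in terms of Nat operations
theorem pv_band_gen (x y : Nat) (hx : 1 ≤ x) (hy : 1 ≤ y) :
    PySem.Int.band ((x : Int) - 1) (Int.not ((y : Int) - 1))
      = (((x - 1) - ((x - 1) &&& (y - 1)) : Nat) : Int) := by
  rw [pv_not_eq]
  have h1 : (0 : Int) ≤ (x : Int) - 1 := by omega
  have h2 : ¬ (0 : Int) ≤ -((y : Int) - 1) - 1 := by omega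
  show PySem.Int.band ((x : Int) - 1) (-((y : Int) - 1) - 1) = _
  unfold PySem.Int.band
  rw [if_pos h1, if_neg h2]
  have e1 : ((x : Int) - 1).toNat = x - 1 := by omega
  have e2 : (-(-((y : Int) - 1) - 1) - 1).toNat = y - 1 := by omega
  rw [e1, e2]

-- A's closed-form range mask, evaluated
theorem pv_maskA_val (a b : Nat) :
    PySem.Int.band ((pvShl1 b) - 1) (Int.not ((pvShl1 a) - 1))
      = ((2 ^ b - 2 ^ min a b : Nat) : Int) := by
  rw [pv_shl_one, pv_shl_one,
      pv_band_gen (2 ^ b) (2 ^ a) Nat.one_le_two_pow Nat.one_le_two_pow,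
      pv_and_masks]
  congr 1
  have hmin : 2 ^ min a b ≤ 2 ^ b := Nat.pow_le_pow_right (by omega) (Nat.min_le_right a b)
  have h1 : (1 : Nat) ≤ 2 ^ min a b := Nat.one_le_two_pow
  have h2 : (1 : Nat) ≤ 2 ^ b := Nat.one_le_two_pow
  omega

-- B's per-bit loop from 0, evaluated: fold over [lo, lo+m) gives 2^(lo+m) - 2^lo
theorem pv_maskB_aux (lo : Int) (hlo : 0 ≤ lo) (m : Nat) :
    (PySem.List.pyRange lo (lo + m)).foldl (fun r e => PySem.Int.bor r (pvShl1 e.toNat)) 0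
      = ((2 ^ (lo.toNat + m) - 2 ^ lo.toNat : Nat) : Int) := by
  induction m with
  | zero => simp [PySem.List.pyRange]
  | succ k ih =>
    have hsplit : PySem.List.pyRange lo (lo + ((k + 1 : Nat) : Int))
        = PySem.List.pyRange lo (lo + k) ++ PySem.List.pyRange (lo + k) (lo + ((k + 1 : Nat) : Int)) := by
      apply PySem.List.pyRange_one_append _ _ _ (by omega) (by push_cast; omega)
    have hone : PySem.List.pyRange (lo + k) (lo + ((k + 1 : Nat) : Int)) = [lo + k] := by
      rw [PySem.List.pyRange_one_cons (by push_cast; omega)]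
      simp [PySem.List.pyRange]
      omega
    rw [hsplit, hone, List.foldl_append, ih]
    simp only [List.foldl_cons, List.foldl_nil]
    have ht : (lo + (k : Int)).toNat = lo.toNat + k := by omega
    rw [ht, pv_shl_one]
    rw [PySem.Int.bor_of_nonneg (Int.natCast_nonneg _) (Int.natCast_nonneg _)]
    rw [Int.toNat_natCast, Int.toNat_natCast]
    have h1 : (1 : Nat) ≤ 2 ^ lo.toNat := Nat.one_le_two_pow
    have h2 : 2 ^ lo.toNat ≤ 2 ^ (lo.toNat + k) := Nat.pow_le_pow_right (by omega) (by omega)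
    have h3 : 2 ^ (lo.toNat + (k + 1)) = 2 ^ (lo.toNat + k) + 2 ^ (lo.toNat + k) := by
      rw [← Nat.add_assoc, Nat.pow_succ]; omega
    rw [pv_or_top _ _ (by omega)]
    congr 1
    omega

theorem pv_maskB_val (lo hi : Int) (hlo : 0 ≤ lo) (hhi : 0 ≤ hi) :
    pvSetBits 0 (lo, hi) = ((2 ^ (hi + 1).toNat - 2 ^ min lo.toNat (hi + 1).toNat : Nat) : Int) := by
  unfold pvSetBits
  by_cases h : lo ≤ hi
  · have hrw : hi + 1 = lo + (((hi + 1 - lo).toNat : Nat) : Int) := by omega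
    rw [hrw, pv_maskB_aux lo hlo]
    have e2 : min lo.toNat (lo + (((hi + 1 - lo).toNat : Nat) : Int)).toNat = lo.toNat := by omega
    have e1 : (lo + (((hi + 1 - lo).toNat : Nat) : Int)).toNat = lo.toNat + (hi + 1 - lo).toNat := by
      omega
    rw [e2, e1]
  · have hnil : PySem.List.pyRange lo (hi + 1) = [] := by
      simp [PySem.List.pyRange]; omega
    have e : min lo.toNat (hi + 1).toNat = (hi + 1).toNat := by omega
    rw [hnil, e]
    simp

-- the single-number mask: B's one-element loop equals A's single shift
theorem pv_maskB_single (n : Int) (hn : 0 ≤ n) :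
    pvSetBits 0 (n, n) = pvShl1 n.toNat := by
  rw [pv_maskB_val n n hn hn, pv_shl_one]
  have e : min n.toNat (n + 1).toNat = n.toNat := by omega
  have et : (n + 1).toNat = n.toNat + 1 := by omega
  rw [e, et]
  congr 1
  have hp : (1 : Nat) ≤ 2 ^ n.toNat := Nat.one_le_two_pow
  have h3 : 2 ^ (n.toNat + 1) = 2 ^ n.toNat + 2 ^ n.toNat := by rw [Nat.pow_succ]; omega
  omega

-- the mask A ORs into ret for one segment (0 for skipped segments)
def pvMaskA (i : String) : Int :=
  if i = "" then 0
  else if PySem.Str.pyGet? i (-1) = some '+' then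
    Int.not ((pvShl1 ((PySem.Int.ofStr? (PySem.Str.slice i none (some (-1)))).getD 0).toNat) - 1)
  else if ((PySem.Str.split? i "-").getD []).length = 1 then
    pvShl1 ((PySem.Int.ofStr? i).getD 0).toNat
  else if ((PySem.Str.split? i "-").getD []).length = 2 then
    PySem.Int.band
      ((pvShl1 (((PySem.Int.ofStr? (((PySem.Str.split? i "-").getD []).getD 1 "")).getD 0 + 1)).toNat) - 1)
      (Int.not ((pvShl1 ((PySem.Int.ofStr? (((PySem.Str.split? i "-").getD []).getD 0 "")).getD 0).toNat) - 1))
  else 0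

theorem pv_stepA (ret : Int) (i : String) :
    epsode_str2int_step ret i = PySem.Int.bor ret (pvMaskA i) := by
  unfold epsode_str2int_step pvMaskA
  split_ifs <;> simp [PySem.Int.bor_zero]

theorem pv_foldA (l : List String) (r : Int) :
    l.foldl epsode_str2int_step r = l.foldl (fun r i => PySem.Int.bor r (pvMaskA i)) r := by
  induction l generalizing r with
  | nil => rfl
  | cons x xs ih => rw [List.foldl_cons, List.foldl_cons, pv_stepA]; exact ih _

-- hoisting the accumulator out of B's inner per-bit loop
theorem pv_setBits_split (r : Int) (iv : Int × Int) :
    pvSetBits r iv = PySem.Int.bor r (pvSetBits 0 iv) := by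
  unfold pvSetBits
  generalize PySem.List.pyRange iv.1 (iv.2 + 1) = l
  induction l generalizing r with
  | nil => simp [PySem.Int.bor_zero]
  | cons x xs ih =>
    simp only [List.foldl_cons]
    rw [ih (PySem.Int.bor r (pvShl1 x.toNat)), ih (PySem.Int.bor 0 (pvShl1 x.toNat))]
    rw [pv_bor_assoc]
    congr 1
    rw [PySem.Int.bor_comm 0, PySem.Int.bor_zero]

-- OR of two open tails is the tail from the smaller start
theorem pv_tail_or (t s : Int) :
    PySem.Int.bor (-(pvShl1 t.toNat)) (-(pvShl1 s.toNat)) = -(pvShl1 (min t s).toNat) := by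
  rw [pv_shl_one, pv_shl_one, pv_shl_one]
  have hmin : (min t s).toNat = min t.toNat s.toNat := by omega
  rw [hmin]
  have h1 : ¬ (0 : Int) ≤ -((2 ^ t.toNat : Nat) : Int) := by
    have : (1 : Nat) ≤ 2 ^ t.toNat := Nat.one_le_two_pow
    omega
  have h2 : ¬ (0 : Int) ≤ -((2 ^ s.toNat : Nat) : Int) := by
    have : (1 : Nat) ≤ 2 ^ s.toNat := Nat.one_le_two_pow
    omega
  unfold PySem.Int.bor
  rw [if_neg h1, if_neg h2]
  have e1 : (-(-((2 ^ t.toNat : Nat) : Int)) - 1).toNat = 2 ^ t.toNat - 1 := by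
    have : (1 : Nat) ≤ 2 ^ t.toNat := Nat.one_le_two_pow
    omega
  have e2 : (-(-((2 ^ s.toNat : Nat) : Int)) - 1).toNat = 2 ^ s.toNat - 1 := by
    have : (1 : Nat) ≤ 2 ^ s.toNat := Nat.one_le_two_pow
    omega
  rw [e1, e2, pv_and_masks]
  have h3 : (1 : Nat) ≤ 2 ^ min s.toNat t.toNat := Nat.one_le_two_pow
  rw [Nat.min_comm s.toNat t.toNat] at h3 ⊢
  omega

-- tail mask as A writes it
theorem pv_tail_not (n : Nat) : Int.not ((pvShl1 n) - 1) = -(pvShl1 n) := by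
  rw [pv_not_eq]; ring

-- main invariant: finishing the parse state after l equals OR-ing A's masks for l onto the finished state
theorem pv_parse_inv (l : List String) (h : ∀ i ∈ l, pvSegOK i = true)
    (st : List (Int × Int) × Option Int) :
    pvFinish (l.foldl pvParseStep st)
      = l.foldl (fun r i => PySem.Int.bor r (pvMaskA i)) (pvFinish st) := by
  induction l generalizing st with
  | nil => rfl
  | cons x xs ih =>
    have hx : pvSegOK x = true := h x List.mem_cons_self
    have hxs : ∀ i ∈ xs, pvSegOK i = true := fun i hi => h i (List.mem_cons_of_mem _ hi)
    rw [List.foldl_cons, List.foldl_cons, ih hxs]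
    congr 1
    -- pvFinish (pvParseStep st x) = bor (pvFinish st) (pvMaskA x)
    unfold pvSegOK at hx
    unfold pvParseStep pvMaskA
    by_cases h0 : x = ""
    · rw [if_pos h0, if_pos h0, PySem.Int.bor_zero]
    · rw [if_neg h0, if_neg h0]; rw [if_neg h0] at hx
      by_cases h1 : PySem.Str.pyGet? x (-1) = some '+'
      · rw [if_pos h1, if_pos h1]; rw [if_pos h1] at hx
        rw [pv_tail_not]
        rcases hst : st.2 with _ | t
        · unfold pvFinish
          simp only [hst]
        · unfold pvFinish
          simp only [hst]
          rw [pv_bor_assoc, pv_tail_or]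
      · rw [if_neg h1, if_neg h1]; rw [if_neg h1] at hx
        by_cases h2 : ((PySem.Str.split? x "-").getD []).length = 1
        · rw [if_pos h2, if_pos h2]; rw [if_pos h2] at hx
          rcases ho : PySem.Int.ofStr? x with _ | n
          · rw [ho] at hx; simp at hx
          · rw [ho] at hx; simp only [decide_eq_true_eq] at hx
            rcases hst : st.2 with _ | t <;>
              · unfold pvFinish
                simp only [hst, List.foldl_append, List.foldl_cons, List.foldl_nil,
                  Option.getD_some]
                rw [pv_setBits_split, pv_maskB_single n hx]
                try rw [pv_bor_rot]
        · rw [if_neg h2, if_neg h2]; rw [if_neg h2] at hx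
          by_cases h3 : ((PySem.Str.split? x "-").getD []).length = 2
          · rw [if_pos h3, if_pos h3]; rw [if_pos h3] at hx
            rcases ho1 : PySem.Int.ofStr? (((PySem.Str.split? x "-").getD []).getD 0 "") with _ | lo
            · rw [ho1] at hx; simp at hx
            · rcases ho2 : PySem.Int.ofStr? (((PySem.Str.split? x "-").getD []).getD 1 "") with _ | hi
              · rw [ho1, ho2] at hx; simp at hx
              · rw [ho1, ho2] at hx; simp only [decide_eq_true_eq] at hx
                have hval : pvSetBits 0 (lo, hi)
                    = PySem.Int.band ((pvShl1 (hi + 1).toNat) - 1)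
                        (Int.not ((pvShl1 lo.toNat) - 1)) := by
                  rw [pv_maskB_val lo hi hx.1 hx.2, pv_maskA_val]
                rcases hst : st.2 with _ | t <;>
                  · unfold pvFinish
                    simp only [hst, List.foldl_append, List.foldl_cons, List.foldl_nil,
                      Option.getD_some]
                    rw [pv_setBits_split, hval]
                    try rw [pv_bor_rot]
          · rw [if_neg h3, if_neg h3, PySem.Int.bor_zero]

-- ===== VERDICT (by name: the statement is the Claim_ definition above) =====
theorem epsode_str2int_spec : Claim_equal_epsode_str2int := by
  intro a _ hpre
  unfold Spec_epsode_str2int epsode_str2int epsode_str2int_alt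
  rw [pv_parse_inv _ hpre ([], none), pv_foldA]
  rfl
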